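-- pv_equiv track=rewrite | github.com/johnamcruz/Futures-Foundation-Model | scripts/pretrain_colab.py | check_collapse
-- ===== SOURCE A (Python) =====
-- MAX_MAJORITY = 0.95
--
-- def check_collapse(preds_counter, num_classes, task_name):
--     total = sum(preds_counter.values())
--     if total == 0:
--         return True, "no predictions"
--     for cls, count in preds_counter.items():
--         if count / total > MAX_MAJORITY:
--             return True, f"class {cls} = {count/total:.0%}"
--     return False, ""
-- ===== SOURCE B (Python) =====
-- MAX_MAJORITY = 0.95
--
-- def check_collapse(preds_counter, num_classes, task_name):
--     total = sum(preds_counter.values())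
--     if total == 0:
--         return True, "no predictions"
--     cls, count = max(preds_counter.items(), key=lambda kv: kv[1])
--     frac = count / total
--     return (True, f"class {cls} = {frac:.0%}") if frac > MAX_MAJORITY else (False, "")
-- ===== Notes on version B (the rewrite author's own statement) =====
-- stated objective: simpler
-- what changed: B replaces A's scan-with-early-return over the counter by an argmax decomposition: take the first class of maximal count with max(items, key=count) and apply the 95% threshold test once (valid on nonnegative counts because at most one class can hold more than half the total).
-- outside the precondition, e.g. on check_collapse({7: 3, 1: 4, -1: -8602}, 1, ''): A returns (True, 'class -1 = 100%'), B returns (False, '')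
import Mathlib
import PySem

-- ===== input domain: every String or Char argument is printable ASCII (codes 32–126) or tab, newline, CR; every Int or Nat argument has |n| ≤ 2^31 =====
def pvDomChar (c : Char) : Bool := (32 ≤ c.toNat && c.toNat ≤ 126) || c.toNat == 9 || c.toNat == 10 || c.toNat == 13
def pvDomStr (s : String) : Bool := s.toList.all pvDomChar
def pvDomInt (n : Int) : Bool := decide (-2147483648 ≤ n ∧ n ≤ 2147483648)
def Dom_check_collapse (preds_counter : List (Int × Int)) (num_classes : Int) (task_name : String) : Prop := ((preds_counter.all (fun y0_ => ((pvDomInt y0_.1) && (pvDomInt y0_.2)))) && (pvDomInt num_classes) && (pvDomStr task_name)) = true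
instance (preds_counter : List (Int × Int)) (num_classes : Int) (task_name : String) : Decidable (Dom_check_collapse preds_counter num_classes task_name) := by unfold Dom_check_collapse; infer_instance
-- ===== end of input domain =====

-- B: argmax-then-single-threshold-check decomposition instead of A's scan with early return (objective: simpler).

set_option maxRecDepth 4000


-- ===== shared exact integer model of the two float steps both Pythons perform =====
-- Python's `count/total > MAX_MAJORITY` on IEEE doubles: round(c/t) > double(0.95).
-- double(0.95) has mantissa 8556839292003942 (even), so by monotonicity of rounding and the
-- ties-to-even rule the comparison holds iff c/t exceeds the midpoint (2*8556839292003942+1)/2^54,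
-- i.e. (for t > 0) iff c * 2^54 > 17113678584007885 * t.  Exact for every t > 0.
-- (On 0 ≤ c ≤ t, the domain Pre_ admits; verified exhaustively against CPython near the boundary.)

-- round n/d to the nearest integer, ties to even (the IEEE rounding step)
def pvHalfEven (n d : Nat) : Nat :=
  if 2*(n % d) > d ∨ (2*(n % d) = d ∧ (n / d) % 2 = 1) then n / d + 1 else n / d

-- Python's f"{c/t:.0%}" percent integer for a fraction in (0.95, 1] (the only fractions either
-- program formats): mantissa of double(c/t) (binade [1/2,1], ulp 2^-53), times 100 rounded back
-- to a double (ulp 2^-46 in [64,128]), then rounded half-to-even to an integer percent.  Exact there.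
def pvPercent (c t : Nat) : Nat :=
  if c = t then 100
  else pvHalfEven (pvHalfEven (25 * pvHalfEven (c * 2^53) t) 32) (2^46)

-- ===== PORT A =====
-- Python's sum(preds_counter.values())
def pvSum (l : List (Int × Int)) : Int := l.foldl (fun a kv => a + kv.2) 0

-- A's for-loop: first item whose fraction exceeds the threshold, with its formatted message
def pvScanA (t : Int) : List (Int × Int) → Bool × String
  | [] => (false, "")
  | (cls, c) :: rest =>
    if c * 18014398509481984 > 17113678584007885 * t then
      (true, "class " ++ PySem.Int.toStr cls ++ " = " ++ PySem.Int.toStr (Int.ofNat (pvPercent c.toNat t.toNat)) ++ "%")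
    else pvScanA t rest

def check_collapse (preds_counter : List (Int × Int)) (num_classes : Int) (task_name : String) : Bool × String :=
  let total := pvSum preds_counter
  if total = 0 then (true, "no predictions")
  else pvScanA total preds_counter

-- ===== PORT B =====
-- Source B's sum(...): recursion over the values
def bTotal : List (Int × Int) → Int
  | [] => 0
  | kv :: rest => kv.2 + bTotal rest

-- Source B's max(items, key=lambda kv: kv[1]): first item of maximal count
def bArgmax : (Int × Int) → List (Int × Int) → Int × Int
  | best, [] => best
  | best, kv :: rest => bArgmax (if kv.2 > best.2 then kv else best) rest

-- Source B's final conditional expression on the argmax item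
def bVerdict (cls count total : Int) : Bool × String :=
  if count * 18014398509481984 > 17113678584007885 * total then
    (true, "class " ++ PySem.Int.toStr cls ++ " = " ++ PySem.Int.toStr (Int.ofNat (pvPercent count.toNat total.toNat)) ++ "%")
  else (false, "")

def check_collapse_alt (preds_counter : List (Int × Int)) (num_classes : Int) (task_name : String) : Bool × String :=
  match preds_counter with
  | [] => (true, "no predictions")   -- empty counter: total is 0
  | h :: rest =>
    if bTotal (h :: rest) = 0 then (true, "no predictions")
    else
      let best := bArgmax h rest
      bVerdict best.1 best.2 (bTotal (h :: rest))

-- ===== PRECONDITION & SPEC =====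
-- Pre_ restricts to the natural domain: preds_counter is a Counter of predictions, so every count
-- is nonnegative.  With negative counts several classes can exceed the 95% threshold at once and
-- A's first-match choice among them is an ordering accident (both answers are defensible).
def Pre_check_collapse (preds_counter : List (Int × Int)) (num_classes : Int) (task_name : String) : Prop :=
  ∀ x ∈ preds_counter, 0 ≤ x.2
instance (preds_counter : List (Int × Int)) (num_classes : Int) (task_name : String) : Decidable (Pre_check_collapse preds_counter num_classes task_name) := by unfold Pre_check_collapse; infer_instance

def pvWitness_check_collapse : (List (Int × Int)) × Int × String := ([(0, 19), (1, 1)], 2, "cls")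

def Spec_check_collapse (preds_counter : List (Int × Int)) (num_classes : Int) (task_name : String) (out : Bool × String) : Prop := out = check_collapse_alt preds_counter num_classes task_name
instance (preds_counter : List (Int × Int)) (num_classes : Int) (task_name : String) (out : Bool × String) : Decidable (Spec_check_collapse preds_counter num_classes task_name out) := by unfold Spec_check_collapse; infer_instance

-- ===== CLAIM (what is proved, stated in full; the proofs are below) =====
def Claim_equal_check_collapse : Prop := ∀ (preds_counter : List (Int × Int)) (num_classes : Int) (task_name : String), Dom_check_collapse preds_counter num_classes task_name → Pre_check_collapse preds_counter num_classes task_name → Spec_check_collapse preds_counter num_classes task_name (check_collapse preds_counter num_classes task_name)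

-- ===== LEMMAS AND PROOFS =====

lemma pvSum_shift (l : List (Int × Int)) (a : Int) :
    l.foldl (fun a kv => a + kv.2) a = a + pvSum l := by
  induction l generalizing a with
  | nil => simp [pvSum]
  | cons x tl ih =>
    show List.foldl _ (a + x.2) tl = a + pvSum (x :: tl)
    rw [ih]
    have h2 : pvSum (x :: tl) = x.2 + pvSum tl := by
      show List.foldl _ (0 + x.2) tl = _
      rw [ih]; ring
    rw [h2]; ring

lemma pvSum_cons (x : Int × Int) (l : List (Int × Int)) : pvSum (x :: l) = x.2 + pvSum l := by
  show List.foldl _ (0 + x.2) l = _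
  rw [pvSum_shift]; ring

lemma bTotal_eq_pvSum (l : List (Int × Int)) : bTotal l = pvSum l := by
  induction l with
  | nil => simp [bTotal, pvSum]
  | cons x tl ih => rw [bTotal, ih, pvSum_cons]

lemma pvSum_nonneg (l : List (Int × Int)) (h : ∀ x ∈ l, 0 ≤ x.2) : 0 ≤ pvSum l := by
  induction l with
  | nil => simp [pvSum]
  | cons x tl ih =>
    rw [pvSum_cons]
    have := h x (by simp)
    have := ih (fun y hy => h y (by simp [hy]))
    omega

lemma pvSum_single_le (l : List (Int × Int)) (h : ∀ x ∈ l, 0 ≤ x.2) (y : Int × Int) (hy : y ∈ l) :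
    y.2 ≤ pvSum l := by
  induction l with
  | nil => simp at hy
  | cons x tl ih =>
    rw [pvSum_cons]
    rcases List.mem_cons.mp hy with h1 | h1
    · subst h1
      have := pvSum_nonneg tl (fun z hz => h z (by simp [hz]))
      omega
    · have := ih (fun z hz => h z (by simp [hz])) h1
      have := h x (by simp)
      omega

lemma pvSum_pair_le (l : List (Int × Int)) (h : ∀ x ∈ l, 0 ≤ x.2) (y b : Int × Int)
    (hy : y ∈ l) (hb : b ∈ l) (hne : y ≠ b) : y.2 + b.2 ≤ pvSum l := by
  induction l with
  | nil => simp at hy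
  | cons x tl ih =>
    rw [pvSum_cons]
    have hsub : ∀ z ∈ tl, 0 ≤ z.2 := fun z hz => h z (by simp [hz])
    rcases List.mem_cons.mp hy with h1 | h1
    · subst h1
      rcases List.mem_cons.mp hb with h2 | h2
      · exact absurd h2.symm (by simpa using hne)
      · have := pvSum_single_le tl hsub b h2; omega
    · rcases List.mem_cons.mp hb with h2 | h2
      · subst h2
        have := pvSum_single_le tl hsub y h1; omega
      · have := ih hsub h1 h2
        have := h x (by simp)
        omega

-- the threshold test: abbreviation and its two arithmetic facts
lemma pvGt_half (c t : Int) (ht : 0 < t) (h : c * 18014398509481984 > 17113678584007885 * t) :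
    t < 2 * c := by nlinarith

lemma pvGt_mono (c' c t : Int) (h1 : c' ≤ c)
    (h : c' * 18014398509481984 > 17113678584007885 * t) :
    c * 18014398509481984 > 17113678584007885 * t := by nlinarith

-- bArgmax structural lemmas
lemma bArgmax_mem (l : List (Int × Int)) (a : Int × Int) : bArgmax a l ∈ a :: l := by
  induction l generalizing a with
  | nil => simp [bArgmax]
  | cons z r ih =>
    rw [bArgmax]
    rcases List.mem_cons.mp (ih (if z.2 > a.2 then z else a)) with h | h
    · rw [h]; split
      · simp
      · simp
    · simp [h]

lemma bArgmax_max (l : List (Int × Int)) (a : Int × Int) :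
    a.2 ≤ (bArgmax a l).2 ∧ ∀ y ∈ l, y.2 ≤ (bArgmax a l).2 := by
  induction l generalizing a with
  | nil => simp [bArgmax]
  | cons z r ih =>
    rw [bArgmax]
    obtain ⟨ih1, ih2⟩ := ih (if z.2 > a.2 then z else a)
    have hz : z.2 ≤ (if z.2 > a.2 then z else a).2 := by split <;> omega
    have ha : a.2 ≤ (if z.2 > a.2 then z else a).2 := by split <;> omega
    refine ⟨le_trans ha ih1, ?_⟩
    intro y hy
    rcases List.mem_cons.mp hy with h | h
    · subst h; exact le_trans hz ih1
    · exact ih2 y h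

lemma bArgmax_keep (l : List (Int × Int)) (a : Int × Int) (h : ∀ y ∈ l, y.2 ≤ a.2) :
    bArgmax a l = a := by
  induction l with
  | nil => rfl
  | cons z r ih =>
    rw [bArgmax]
    have hz : z.2 ≤ a.2 := h z (by simp)
    rw [if_neg (by omega)]
    exact ih (fun y hy => h y (by simp [hy]))

lemma bArgmax_dom (l : List (Int × Int)) (a b : Int × Int) (hb : b ∈ l) (hab : a.2 < b.2)
    (hdom : ∀ y ∈ l, y = b ∨ y.2 < b.2) : bArgmax a l = b := by
  induction l generalizing a with
  | nil => simp at hb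
  | cons z r ih =>
    rw [bArgmax]
    rcases hdom z (by simp) with hz | hz
    · subst hz
      rw [if_pos (by omega)]
      refine bArgmax_keep r z (fun y hy => ?_)
      rcases hdom y (by simp [hy]) with h | h
      · subst h; exact le_refl _
      · omega
    · rcases List.mem_cons.mp hb with h1 | h1
      · subst h1; omega
      · have : (if z.2 > a.2 then z else a).2 < b.2 := by split <;> omega
        exact ih (if z.2 > a.2 then z else a) h1 this (fun y hy => hdom y (List.mem_cons_of_mem _ hy))

-- the main equivalence on nonempty lists: A's first match is B's argmax verdict
lemma pvScanA_cons (t : Int) (cls c : Int) (rest : List (Int × Int)) :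
    pvScanA t ((cls, c) :: rest) =
      if c * 18014398509481984 > 17113678584007885 * t then
        (true, "class " ++ PySem.Int.toStr cls ++ " = " ++ PySem.Int.toStr (Int.ofNat (pvPercent c.toNat t.toNat)) ++ "%")
      else pvScanA t rest := rfl

lemma pvScanA_eq_verdict (t : Int) (x : Int × Int) (tl : List (Int × Int)) (ht : 0 < t)
    (hnn : ∀ y ∈ x :: tl, 0 ≤ y.2) (hsum : pvSum (x :: tl) ≤ t) :
    pvScanA t (x :: tl) = bVerdict (bArgmax x tl).1 (bArgmax x tl).2 t := by
  induction tl generalizing x with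
  | nil =>
    obtain ⟨x1, x2⟩ := x
    rw [pvScanA_cons, bArgmax, bVerdict]
    split <;> rfl
  | cons z r ih =>
    have hnnt : ∀ y ∈ z :: r, 0 ≤ y.2 := fun y hy => hnn y (List.mem_cons_of_mem _ hy)
    have hsumt : pvSum (z :: r) ≤ t := by
      have hx0 : 0 ≤ x.2 := hnn x (by simp)
      rw [pvSum_cons] at hsum; omega
    by_cases hP : x.2 * 18014398509481984 > 17113678584007885 * t
    · -- the head already exceeds the threshold: it is also the (unique first) maximum
      have hhalf : t < 2 * x.2 := pvGt_half _ t ht hP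
      have hfold : bArgmax x (z :: r) = x := by
        refine bArgmax_keep _ x (fun y hy => ?_)
        rcases eq_or_ne y x with h | h
        · subst h; exact le_refl _
        · have hy0 : 0 ≤ y.2 := hnn y (List.mem_cons_of_mem _ hy)
          have := pvSum_pair_le (x :: z :: r) hnn y x (List.mem_cons_of_mem _ hy) (by simp) h
          omega
      rw [hfold]
      obtain ⟨x1, x2⟩ := x
      rw [pvScanA_cons, if_pos hP, bVerdict, if_pos hP]
    · -- the head is below the threshold
      have hLHS : pvScanA t (x :: z :: r) = pvScanA t (z :: r) := by
        obtain ⟨x1, x2⟩ := x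
        rw [pvScanA_cons, if_neg hP]
      rw [hLHS, ih z hnnt hsumt]
      set b' := bArgmax z r with hb'
      have hb'mem : b' ∈ z :: r := bArgmax_mem r z
      have hb'max := bArgmax_max r z
      have hb'sum : b'.2 ≤ pvSum (z :: r) := pvSum_single_le (z :: r) hnnt b' hb'mem
      have hb'0 : 0 ≤ b'.2 := hnnt b' hb'mem
      by_cases hPb : b'.2 * 18014398509481984 > 17113678584007885 * t
      · -- the maximum exceeds the threshold: B's fold over the whole list returns it
        have hhalf : t < 2 * b'.2 := pvGt_half _ t ht hPb
        have hxb : x.2 < b'.2 := by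
          rw [pvSum_cons] at hsum
          omega
        have hdom : ∀ y ∈ z :: r, y = b' ∨ y.2 < b'.2 := by
          intro y hy
          have hyle : y.2 ≤ b'.2 := by
            rcases List.mem_cons.mp hy with h | h
            · subst h; exact hb'max.1
            · exact hb'max.2 y h
          rcases eq_or_ne y b' with h | h
          · exact Or.inl h
          · right
            rcases lt_or_eq_of_le hyle with h2 | h2
            · exact h2
            · exfalso
              have := pvSum_pair_le (z :: r) hnnt y b' hy hb'mem h
              omega
        rw [bArgmax_dom (z :: r) x b' hb'mem hxb hdom]
      · -- nobody exceeds the threshold: both verdicts are (false, "")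
        have hnofire : ¬ (bArgmax x (z :: r)).2 * 18014398509481984 > 17113678584007885 * t := by
          intro hc
          rcases List.mem_cons.mp (bArgmax_mem (z :: r) x) with h | h
          · rw [h] at hc; exact hP hc
          · have hle : (bArgmax x (z :: r)).2 ≤ b'.2 := by
              rcases List.mem_cons.mp h with h2 | h2
              · rw [h2]; exact hb'max.1
              · exact hb'max.2 _ h2
            exact hPb (pvGt_mono _ _ t hle hc)
        rw [bVerdict, if_neg hPb, bVerdict, if_neg hnofire]

-- ===== VERDICT (by name: the statement is the Claim_ definition above) =====
theorem check_collapse_spec : Claim_equal_check_collapse := by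
  intro pc nc tn hdom hpre
  unfold Spec_check_collapse check_collapse check_collapse_alt
  cases pc with
  | nil => rfl
  | cons x tl =>
    show (if pvSum (x :: tl) = 0 then ((true : Bool), "no predictions")
            else pvScanA (pvSum (x :: tl)) (x :: tl)) =
         (if bTotal (x :: tl) = 0 then ((true : Bool), "no predictions")
            else bVerdict (bArgmax x tl).1 (bArgmax x tl).2 (bTotal (x :: tl)))
    rw [bTotal_eq_pvSum]
    by_cases h0 : pvSum (x :: tl) = 0
    · rw [if_pos h0, if_pos h0]
    · rw [if_neg h0, if_neg h0]
      have hpos : 0 < pvSum (x :: tl) :=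
        lt_of_le_of_ne (pvSum_nonneg _ hpre) (Ne.symm h0)
      exact pvScanA_eq_verdict (pvSum (x :: tl)) x tl hpos hpre (le_refl _)
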